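-- pv_equiv track=rewrite | github.com/nusgnojkrap/pythonJong | s1007_1.py | jong
-- ===== SOURCE A (Python) =====
-- def jong(case, a, b, sumX, sumY, n, min, position):
--     if int(position) == 0:
--         result = (a - 2 * sumX) * (a - 2 * sumX) + (b - 2 * sumY) * (b - 2 * sumY)
--         if min == -1:
--             min = result
--             return min
--         if min > result:
--             min = result
--         return min
--
--     for i in range(0, len(case) - int(position)):
--         sumX = sumX + int(case[i][0])
--         sumY = sumY + int(case[i][1])
--         copyArr = case[i+1:].copy()
--         min = jong(copyArr, a, b, sumX, sumY, n, min, int(position)-1)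
--         sumX = sumX - int(case[i][0])
--         sumY = sumY - int(case[i][1])
--
--     return min
-- ===== SOURCE B (Python) =====
-- def _subset_sums(pts, k, sx, sy):
--     # All (sumX, sumY) obtained by adding k distinct points of pts to (sx, sy),
--     # built by a one-pass layered DP (Pascal-triangle style) instead of recursion.
--     if k == 0:
--         return [(sx, sy)]
--     if k < 0 or k > len(pts):
--         return []
--     layers = [[(sx, sy)]] + [[] for _ in range(k)]
--     for pt in pts:
--         x, y = int(pt[0]), int(pt[1])
--         for j in range(k, 0, -1):
--             layers[j] = layers[j] + [(s0 + x, s1 + y) for (s0, s1) in layers[j - 1]]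
--     return layers[k]
--
--
-- def jong(case, a, b, sumX, sumY, n, min, position):
--     # The last element of case is never selectable, so enumerate k-subsets of case[:-1].
--     best = min
--     for sx, sy in _subset_sums(case[:-1], int(position), sumX, sumY):
--         r = (a - 2 * sx) * (a - 2 * sx) + (b - 2 * sy) * (b - 2 * sy)
--         if best == -1 or best > r:
--             best = r
--     return best
-- ===== Notes on version B (the rewrite author's own statement) =====
-- stated objective: alternative
-- what changed: A's hand-rolled recursive backtracking over list suffixes (copying a slice per call) is replaced by a non-recursive layered subset-sum DP: one left-to-right pass over case[:-1] maintaining, per subset size j, the list of attainable (sumX,sumY) sums, followed by a single min-fold over the size-position layer.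
import Mathlib
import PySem

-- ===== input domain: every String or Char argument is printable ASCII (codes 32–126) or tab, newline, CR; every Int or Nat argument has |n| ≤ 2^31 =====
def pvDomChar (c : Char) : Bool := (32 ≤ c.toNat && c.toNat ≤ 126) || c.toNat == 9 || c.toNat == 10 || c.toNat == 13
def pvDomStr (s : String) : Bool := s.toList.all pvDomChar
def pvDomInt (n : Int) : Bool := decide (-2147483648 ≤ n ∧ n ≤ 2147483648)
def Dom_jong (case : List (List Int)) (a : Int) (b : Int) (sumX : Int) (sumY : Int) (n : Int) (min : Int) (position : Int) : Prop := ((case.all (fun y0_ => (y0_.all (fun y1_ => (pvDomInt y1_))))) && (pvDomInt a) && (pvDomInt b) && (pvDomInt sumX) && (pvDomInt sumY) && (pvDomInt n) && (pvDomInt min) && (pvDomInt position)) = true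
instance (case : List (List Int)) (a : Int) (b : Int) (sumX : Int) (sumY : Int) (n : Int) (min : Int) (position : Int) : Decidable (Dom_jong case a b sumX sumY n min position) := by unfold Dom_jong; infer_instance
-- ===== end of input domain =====

-- B replaces A's recursive backtracking over suffixes by a one-pass layered subset-sum DP
-- (Pascal-triangle style) followed by a single min-fold; equivalence of RETURN values proved.


-- ===== PORT A =====
-- Literal port of A's recursive backtracking.  The 'position < 0' branch is a totality
-- guard only: there Python A raises IndexError (excluded by Pre_jong).
def jong (case : List (List Int)) (a : Int) (b : Int) (sumX : Int) (sumY : Int) (n : Int) (min : Int) (position : Int) : Int :=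
  if position = 0 then
    let result := (a - 2 * sumX) * (a - 2 * sumX) + (b - 2 * sumY) * (b - 2 * sumY)
    if min = -1 then result
    else if min > result then result
    else min
  else if position < 0 then min
  else
    (PySem.List.pyRange 0 ((case.length : Int) - position) 1).foldl
      (fun m i =>
        let row := PySem.List.pyGetD case i []
        let x := PySem.List.pyGetD row 0 0
        let y := PySem.List.pyGetD row 1 0
        jong (PySem.List.slice case (some (i + 1)) none) a b (sumX + x) (sumY + y) n m (position - 1))
      min
termination_by position.toNat
decreasing_by omega

-- ===== PORT B =====
-- layers[:1] + [cur + [(s0+x, s1+y) for (s0,s1) in older] for cur, older in zip(layers[1:], layers)]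
def pvStepLayers (f : Int × Int → Int × Int) (ls : List (List (Int × Int))) : List (List (Int × Int)) :=
  PySem.List.slice ls none (some 1) ++
    ((PySem.List.slice ls (some 1) none).zip ls).map (fun co => co.1 ++ co.2.map f)

-- port of _subset_sums
def pvSubsetSums (pts : List (List Int)) (k : Int) (sx : Int) (sy : Int) : List (Int × Int) :=
  if k = 0 then [(sx, sy)]
  else if k < 0 ∨ (pts.length : Int) < k then []
  else
    let layers0 : List (List (Int × Int)) := [[(sx, sy)]] ++ List.replicate k.toNat []
    let layers := pts.foldl (fun ls pt =>
      let x := PySem.List.pyGetD pt 0 0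
      let y := PySem.List.pyGetD pt 1 0
      pvStepLayers (fun s => (s.1 + x, s.2 + y)) ls) layers0
    PySem.List.pyGetD layers (-1) []

def jong_alt (case : List (List Int)) (a : Int) (b : Int) (sumX : Int) (sumY : Int) (n : Int) (min : Int) (position : Int) : Int :=
  (pvSubsetSums (PySem.List.slice case none (some (-1))) position sumX sumY).foldl
    (fun best s =>
      let r := (a - 2 * s.1) * (a - 2 * s.1) + (b - 2 * s.2) * (b - 2 * s.2)
      if best = -1 ∨ best > r then r else best)
    min

-- ===== PRECONDITION & SPEC =====
-- Pre_jong holds exactly where Python A returns: A raises IndexError when position < 0,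
-- and when 0 < position < len(case) on a row of case[:-1] with fewer than 2 entries
-- (every such row is indexed by some recursive branch).
def Pre_jong (case : List (List Int)) (a : Int) (b : Int) (sumX : Int) (sumY : Int) (n : Int) (min : Int) (position : Int) : Prop :=
  0 ≤ position ∧ (position = 0 ∨ (case.length : Int) ≤ position ∨ ∀ row ∈ case.dropLast, 2 ≤ row.length)
instance (case : List (List Int)) (a : Int) (b : Int) (sumX : Int) (sumY : Int) (n : Int) (min : Int) (position : Int) : Decidable (Pre_jong case a b sumX sumY n min position) := by unfold Pre_jong; infer_instance
def pvWitness_jong : List (List Int) × Int × Int × Int × Int × Int × Int × Int := ([[1, 2], [3, 4], [5, 6]], 1, 2, 0, 0, 0, -1, 1)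

def Spec_jong (case : List (List Int)) (a : Int) (b : Int) (sumX : Int) (sumY : Int) (n : Int) (min : Int) (position : Int) (out : Int) : Prop := out = jong_alt case a b sumX sumY n min position
instance (case : List (List Int)) (a : Int) (b : Int) (sumX : Int) (sumY : Int) (n : Int) (min : Int) (position : Int) (out : Int) : Decidable (Spec_jong case a b sumX sumY n min position out) := by unfold Spec_jong; infer_instance

-- ===== CLAIM (what is proved, stated in full; the proofs are below) =====
def Claim_equal_jong : Prop := ∀ (case : List (List Int)) (a : Int) (b : Int) (sumX : Int) (sumY : Int) (n : Int) (min : Int) (position : Int), Dom_jong case a b sumX sumY n min position → Pre_jong case a b sumX sumY n min position → Spec_jong case a b sumX sumY n min position (jong case a b sumX sumY n min position)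

-- ===== LEMMAS AND PROOFS =====

-- (x, y) read from a row, exactly as both ports read it
def pvToPair (row : List Int) : Int × Int := (PySem.List.pyGetD row 0 0, PySem.List.pyGetD row 1 0)

def pvPts (case : List (List Int)) : List (Int × Int) := case.dropLast.map pvToPair

def pvAddP (q s : Int × Int) : Int × Int := (s.1 + q.1, s.2 + q.2)

-- sums over k-element subsets of qs added to base, in A's (lexicographic) order
def pvC (base : Int × Int) : List (Int × Int) → Nat → List (Int × Int)
  | _, 0 => [base]
  | [], _ + 1 => []
  | q :: rest, k + 1 => pvC (pvAddP q base) rest k ++ pvC base rest (k + 1)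

def pvRes (a b : Int) (s : Int × Int) : Int :=
  (a - 2 * s.1) * (a - 2 * s.1) + (b - 2 * s.2) * (b - 2 * s.2)

def pvStep (a b : Int) (m : Int) (s : Int × Int) : Int :=
  if m = -1 ∨ m > pvRes a b s then pvRes a b s else m

theorem pvC_nil_of_lt (base : Int × Int) : ∀ (xs : List (Int × Int)) (k : Nat), xs.length < k → pvC base xs k = [] := by
  intro xs
  induction xs generalizing base with
  | nil => intro k hk; cases k with | zero => omega | succ k => rfl
  | cons q rest ih =>
    intro k hk
    cases k with
    | zero => omega
    | succ k =>
      simp only [pvC]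
      rw [ih _ k (by simpa using hk), ih _ (k+1) (by simp at hk ⊢; omega)]
      rfl

theorem A_char (a b n : Int) : ∀ (k : Nat) (case : List (List Int)) (sumX sumY mi : Int),
    jong case a b sumX sumY n mi (k : Int) = (pvC (sumX, sumY) (pvPts case) k).foldl (pvStep a b) mi := by
  intro k
  induction k with
  | zero =>
    intro case sumX sumY mi
    rw [jong]
    simp only [pvC, pvPts, List.foldl, pvStep, pvRes]
    split_ifs <;> simp_all <;> omega
  | succ k ih =>
    intro case
    induction case with
    | nil =>
      intro sumX sumY mi
      rw [jong, if_neg (by omega), if_neg (by omega)]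
      rw [PySem.List.pyRange_one_eq_nil (by simp)]
      rw [pvC_nil_of_lt _ _ _ (by simp [pvPts])]
      rfl
    | cons c0 case' ihc =>
      intro sumX sumY mi
      by_cases hM : (case'.length : Int) - (k : Int) ≤ 0
      · rw [jong, if_neg (by omega), if_neg (by omega)]
        rw [PySem.List.pyRange_one_eq_nil (by simp; omega)]
        rw [pvC_nil_of_lt _ _ _ (by simp [pvPts]; omega)]
        rfl
      · have hne : case' ≠ [] := by intro h; subst h; simp at hM
        rw [jong, if_neg (by omega), if_neg (by omega)]
        rw [PySem.List.pyRange_one_cons (by simp; omega)]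
        rw [List.foldl_cons]
        have hloop : ∀ acc : Int,
            (PySem.List.pyRange (0 + 1) ((((c0 :: case').length : Int)) - ((k : Nat) + 1 : Nat)) 1).foldl
              (fun m i =>
                jong (PySem.List.slice (c0 :: case') (some (i + 1)) none) a b
                  (sumX + PySem.List.pyGetD (PySem.List.pyGetD (c0 :: case') i []) 0 0)
                  (sumY + PySem.List.pyGetD (PySem.List.pyGetD (c0 :: case') i []) 1 0) n m
                  (((k : Nat) + 1 : Nat) - 1)) acc
            = jong case' a b sumX sumY n acc ((k : Nat) + 1 : Nat) := by
          intro acc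
          rw [jong, if_neg (by omega), if_neg (by omega)]
          rw [PySem.List.pyRange_one (0+1), PySem.List.pyRange_one 0]
          have harg : ((((c0 :: case').length : Int)) - ((k : Nat) + 1 : Nat) - (0 + 1)) = (((case'.length : Int)) - ((k : Nat) + 1 : Nat) - 0) := by
            simp; omega
          rw [harg]
          rw [List.foldl_map, List.foldl_map]
          apply PySem.List.foldl_congr_mem
          intro m j _
          have h1 : (0 + 1 + (j : Int)) = ((j + 1 : Nat) : Int) := by push_cast; ring
          have h2 : ((0 : Int) + (j : Int)) = ((j : Nat) : Int) := by push_cast; ring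
          rw [h1, h2]
          rw [PySem.List.pyGetD_natCast, PySem.List.pyGetD_natCast, List.getD_cons_succ]
          have h3 : (((j + 1 : Nat) : Int) + 1) = (((j + 2 : Nat) : Nat) : Int) := by push_cast; ring
          have h4 : (((j : Nat) : Int) + 1) = (((j + 1 : Nat) : Nat) : Int) := by push_cast; ring
          rw [h3, h4]
          rw [PySem.List.slice_from _ (by positivity), PySem.List.slice_from _ (by positivity)]
          simp
          have hd : ((j : Int) + 2).toNat = j + 2 := by omega
          rw [hd, List.drop_succ_cons]
        rw [hloop]
        have hfirst :
            jong (PySem.List.slice (c0 :: case') (some ((0:Int) + 1)) none) a b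
              (sumX + PySem.List.pyGetD (PySem.List.pyGetD (c0 :: case') 0 []) 0 0)
              (sumY + PySem.List.pyGetD (PySem.List.pyGetD (c0 :: case') 0 []) 1 0) n mi
              (((k : Nat) + 1 : Nat) - 1)
            = (pvC (sumX + (pvToPair c0).1, sumY + (pvToPair c0).2) (pvPts case') k).foldl (pvStep a b) mi := by
          have h5 : ((0:Int) + 1) = ((1 : Nat) : Int) := by norm_num
          have h6 : ((((k : Nat) + 1 : Nat) : Int) - 1) = ((k : Nat) : Int) := by push_cast; ring
          rw [h5, h6, PySem.List.slice_from _ (by norm_num)]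
          simp only [PySem.List.pyGetD_zero_cons]
          rw [show ((1:Nat):Int).toNat = 1 from rfl]
          rw [show List.drop 1 (c0 :: case') = case' from rfl]
          exact ih case' _ _ mi
        rw [hfirst]
        rw [ihc]
        have hsplit : pvC (sumX, sumY) (pvPts (c0 :: case')) (k + 1)
            = pvC (pvAddP (pvToPair c0) (sumX, sumY)) (pvPts case') k ++ pvC (sumX, sumY) (pvPts case') (k + 1) := by
          rw [pvPts, List.dropLast_cons_of_ne_nil hne]
          rfl
        rw [hsplit, List.foldl_append]
        rfl

theorem pvAddP_left_comm (p q s : Int × Int) : pvAddP p (pvAddP q s) = pvAddP q (pvAddP p s) := by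
  simp only [pvAddP, Prod.mk.injEq]
  constructor <;> ring

theorem pvC_map_shift (q : Int × Int) : ∀ (qs : List (Int × Int)) (base : Int × Int) (j : Nat),
    (pvC base qs j).map (pvAddP q) = pvC (pvAddP q base) qs j := by
  intro qs
  induction qs with
  | nil => intro base j; cases j <;> rfl
  | cons p rest ih =>
    intro base j
    cases j with
    | zero => rfl
    | succ j =>
      simp only [pvC, List.map_append, ih]
      rw [pvAddP_left_comm]

theorem pvShuffle {α : Type} (A B C D : List α) : List.Perm ((A ++ B) ++ (C ++ D)) ((A ++ C) ++ (B ++ D)) := by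
  have h2 := ((List.perm_append_comm (l₁ := B) (l₂ := C)).append_right D).append_left A
  refine (List.Perm.of_eq ?_).trans (h2.trans (List.Perm.of_eq ?_)) <;> simp [List.append_assoc]

theorem pvC_snoc (t : Int × Int) : ∀ (qs : List (Int × Int)) (base : Int × Int) (j : Nat),
    List.Perm (pvC base (qs ++ [t]) (j + 1)) (pvC base qs (j + 1) ++ pvC (pvAddP t base) qs j) := by
  intro qs
  induction qs with
  | nil =>
    intro base j
    cases j with
    | zero => simp [pvC]
    | succ j => simp [pvC]
  | cons p rest ih =>
    intro base j
    cases j with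
    | zero =>
      simp only [List.cons_append, pvC]
      refine (((ih base 0).append_left [pvAddP p base]).trans (List.Perm.of_eq ?_))
      simp [pvC, List.append_assoc]
    | succ j =>
      simp only [List.cons_append, pvC]
      refine ((ih _ j).append (ih base (j + 1))).trans ?_
      rw [pvAddP_left_comm t p base]
      exact pvShuffle _ _ _ _

theorem pvForall2_trans {α : Type} : ∀ {l1 l2 l3 : List (List α)},
    List.Forall₂ List.Perm l1 l2 → List.Forall₂ List.Perm l2 l3 → List.Forall₂ List.Perm l1 l3 := by
  intro l1 l2 l3 h12
  induction h12 generalizing l3 with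
  | nil => intro h; cases h; exact List.Forall₂.nil
  | cons hx hxs ih =>
    intro h
    cases h with
    | cons hy hys => exact List.Forall₂.cons (hx.trans hy) (ih hys)

theorem pvStepLayers_cons (f : Int × Int → Int × Int) (l0 : List (Int × Int)) (r : List (List (Int × Int))) :
    pvStepLayers f (l0 :: r) = l0 :: ((r.zip (l0 :: r)).map (fun co => co.1 ++ co.2.map f)) := by
  unfold pvStepLayers
  rw [PySem.List.slice_to _ (by norm_num), PySem.List.slice_from_one]
  rfl

theorem pvZipAux (f : Int × Int → Int × Int) : ∀ {r r' : List (List (Int × Int))},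
    List.Forall₂ List.Perm r r' → ∀ {p p' : List (Int × Int)}, List.Perm p p' →
    List.Forall₂ List.Perm ((r.zip (p :: r)).map (fun co => co.1 ++ co.2.map f))
      ((r'.zip (p' :: r')).map (fun co => co.1 ++ co.2.map f)) := by
  intro r r' h
  induction h with
  | nil => intro p p' hp; exact List.Forall₂.nil
  | cons hx hxs ih =>
    intro p p' hp
    exact List.Forall₂.cons (hx.append (hp.map f)) (ih hx)

theorem pvStepLayers_forall2 (f : Int × Int → Int × Int) {ls ls' : List (List (Int × Int))}
    (h : List.Forall₂ List.Perm ls ls') :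
    List.Forall₂ List.Perm (pvStepLayers f ls) (pvStepLayers f ls') := by
  cases h with
  | nil => exact List.Forall₂.nil
  | cons h0 hr =>
    rw [pvStepLayers_cons, pvStepLayers_cons]
    exact List.Forall₂.cons h0 (pvZipAux f hr h0)

theorem pvZipSpec (base t : Int × Int) (qs : List (Int × Int)) :
    ∀ (m i : Nat),
    List.Forall₂ List.Perm
      ((((List.range m).map (fun j => pvC base qs (i + j + 1))).zip
          ((List.range (m + 1)).map (fun j => pvC base qs (i + j)))).map
        (fun co => co.1 ++ co.2.map (pvAddP t)))
      ((List.range m).map (fun j => pvC base (qs ++ [t]) (i + j + 1))) := by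
  intro m
  induction m with
  | zero => intro i; simp
  | succ m ih =>
    intro i
    rw [List.range_succ_eq_map, List.range_succ_eq_map (n := m + 1)]
    simp only [List.map_cons, List.map_map, List.zip_cons_cons]
    refine List.Forall₂.cons ?_ ?_
    · rw [pvC_map_shift]
      exact (pvC_snoc t qs base (i + 0)).symm
    · have e1 : ((fun j => pvC base qs (i + j + 1)) ∘ Nat.succ) = (fun j => pvC base qs ((i + 1) + j + 1)) := by
        funext j; simp [Function.comp]; congr 1; omega
      have e2 : ((fun j => pvC base qs (i + j)) ∘ Nat.succ) = (fun j => pvC base qs ((i + 1) + j)) := by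
        funext j; simp [Function.comp]; congr 1; omega
      have e3 : ((fun j => pvC base (qs ++ [t]) (i + j + 1)) ∘ Nat.succ) = (fun j => pvC base (qs ++ [t]) ((i + 1) + j + 1)) := by
        funext j; simp [Function.comp]; congr 1; omega
      rw [e1, e2, e3]
      exact ih (i + 1)

theorem pvC_zero (base : Int × Int) (qs : List (Int × Int)) : pvC base qs 0 = [base] := by
  cases qs <;> rfl

theorem pvSpecStep (base t : Int × Int) (qs : List (Int × Int)) (k : Nat) :
    List.Forall₂ List.Perm
      (pvStepLayers (pvAddP t) ((List.range (k + 1)).map (fun j => pvC base qs j)))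
      ((List.range (k + 1)).map (fun j => pvC base (qs ++ [t]) j)) := by
  rw [List.range_succ_eq_map, List.map_cons, List.map_cons, pvStepLayers_cons, List.map_map, List.map_map]
  refine List.Forall₂.cons (List.Perm.of_eq (by rw [pvC_zero, pvC_zero])) ?_
  have e1 : ((fun j => pvC base qs j) ∘ Nat.succ) = (fun j => pvC base qs (0 + j + 1)) := by
    funext j; simp [Function.comp]
  have e2 : ((fun j => pvC base (qs ++ [t]) j) ∘ Nat.succ) = (fun j => pvC base (qs ++ [t]) (0 + j + 1)) := by
    funext j; simp [Function.comp]
  rw [e1, e2]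
  have e3 : (pvC base qs 0 :: (List.range k).map (fun j => pvC base qs (0 + j + 1)))
      = (List.range (k + 1)).map (fun j => pvC base qs (0 + j)) := by
    rw [List.range_succ_eq_map, List.map_cons, List.map_map]
    refine congrArg₂ _ rfl ?_
    refine congrArg₂ _ ?_ rfl
    funext j
    simp [Function.comp]
  rw [e3]
  exact pvZipSpec base t qs k 0

theorem pvDP (base : Int × Int) (k : Nat) : ∀ (pts : List (List Int)),
    List.Forall₂ List.Perm
      (pts.foldl (fun ls pt =>
          pvStepLayers (fun s => (s.1 + PySem.List.pyGetD pt 0 0, s.2 + PySem.List.pyGetD pt 1 0)) ls)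
        ([[base]] ++ List.replicate k []))
      ((List.range (k + 1)).map (fun j => pvC base (pts.map pvToPair) j)) := by
  intro pts
  induction pts using List.reverseRecOn with
  | nil =>
    rw [List.foldl_nil]
    have he : ((List.range (k + 1)).map (fun j => pvC base ((([] : List (List Int)).map pvToPair)) j))
        = [[base]] ++ List.replicate k [] := by
      rw [List.range_succ_eq_map, List.map_cons, List.map_map]
      refine congrArg₂ _ (by rw [pvC_zero]) ?_
      have : ((fun j => pvC base (([] : List (List Int)).map pvToPair) j) ∘ Nat.succ)
          = (fun _ => ([] : List (Int × Int))) := by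
        funext j; rfl
      rw [this, List.map_const', List.length_range]
      rfl
    rw [he]
    induction ([[base]] ++ List.replicate k ([] : List (Int × Int))) with
    | nil => exact List.Forall₂.nil
    | cons x xs ihx => exact List.Forall₂.cons (List.Perm.refl x) ihx
  | append_singleton pts row ih =>
    rw [List.foldl_append, List.foldl_cons, List.foldl_nil]
    have hf : (fun s : Int × Int => (s.1 + PySem.List.pyGetD row 0 0, s.2 + PySem.List.pyGetD row 1 0))
        = pvAddP (pvToPair row) := rfl
    rw [hf, List.map_append, List.map_cons, List.map_nil]
    exact pvForall2_trans (pvStepLayers_forall2 _ ih) (pvSpecStep base (pvToPair row) (pts.map pvToPair) k)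

theorem pvRes_nonneg (a b : Int) (s : Int × Int) : 0 ≤ pvRes a b s := by
  unfold pvRes
  exact add_nonneg (mul_self_nonneg _) (mul_self_nonneg _)

theorem pvStep_rcomm (a b : Int) (m : Int) (s t : Int × Int) :
    pvStep a b (pvStep a b m s) t = pvStep a b (pvStep a b m t) s := by
  have h1 := pvRes_nonneg a b s
  have h2 := pvRes_nonneg a b t
  unfold pvStep
  split_ifs <;> omega

theorem B_char : ∀ (k : Nat) (pts : List (List Int)) (sx sy : Int),
    List.Perm (pvSubsetSums pts (k : Int) sx sy) (pvC (sx, sy) (pts.map pvToPair) k) := by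
  intro k pts sx sy
  cases k with
  | zero => simp [pvSubsetSums, pvC_zero]
  | succ k =>
    by_cases hlen : (pts.length : Int) < ((k + 1 : Nat) : Int)
    · rw [pvSubsetSums, if_neg (by omega), if_pos (Or.inr hlen)]
      exact List.Perm.of_eq (pvC_nil_of_lt _ _ _ (by simp; omega)).symm
    · rw [pvSubsetSums, if_neg (by omega), if_neg (by simp; omega)]
      simp only [Int.toNat_natCast]
      have hdp := pvDP (sx, sy) (k + 1) pts
      have hlen2 := List.Forall₂.length_eq hdp
      simp only [List.length_map, List.length_range] at hlen2
      have hne : (pts.foldl (fun ls pt =>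
          pvStepLayers (fun s => (s.1 + PySem.List.pyGetD pt 0 0, s.2 + PySem.List.pyGetD pt 1 0)) ls)
          ([[(sx, sy)]] ++ List.replicate (k + 1) [])) ≠ [] := by
        intro h
        rw [h] at hlen2
        simp at hlen2
      rw [PySem.List.pyGetD_neg_one (h := hne)]
      rw [List.getLast_eq_getElem]
      have hidx : (pts.foldl (fun ls pt =>
          pvStepLayers (fun s => (s.1 + PySem.List.pyGetD pt 0 0, s.2 + PySem.List.pyGetD pt 1 0)) ls)
          ([[(sx, sy)]] ++ List.replicate (k + 1) [])).length - 1 = k + 1 := by omega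
      have hget := (List.forall₂_iff_get.mp hdp).2 (k + 1) (by omega) (by simp)
      simp only [List.get_eq_getElem, List.getElem_map, List.getElem_range] at hget
      convert hget using 2

theorem jong_eq_alt (case : List (List Int)) (a b sumX sumY n mi position : Int)
    (hpos : 0 ≤ position) :
    jong case a b sumX sumY n mi position = jong_alt case a b sumX sumY n mi position := by
  have hk : position = ((position.toNat : Nat) : Int) := (Int.toNat_of_nonneg hpos).symm
  rw [hk]
  rw [A_char a b n position.toNat case sumX sumY mi]
  unfold jong_alt
  rw [PySem.List.slice_to_neg_one]
  have hfn : (fun (best : Int) (s : Int × Int) =>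
      let r := (a - 2 * s.1) * (a - 2 * s.1) + (b - 2 * s.2) * (b - 2 * s.2)
      if best = -1 ∨ best > r then r else best) = pvStep a b := rfl
  rw [hfn]
  haveI : RightCommutative (pvStep a b) := ⟨pvStep_rcomm a b⟩
  exact ((B_char position.toNat case.dropLast sumX sumY).foldl_eq mi).symm

-- ===== VERDICT (by name: the statement is the Claim_ definition above) =====
theorem jong_spec : Claim_equal_jong := by
  intro case a b sumX sumY n min position _ hpre
  unfold Spec_jong
  exact jong_eq_alt case a b sumX sumY n min position hpre.1
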